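-- pv_equiv track=rewrite | github.com/JunnYu/jy_ner | jy_models/layer/span_extractor.py | get_combined_dim
-- ===== SOURCE A (Python) =====
-- from typing import List, Optional
--
-- class ConfigurationError(Exception):
--     """
--     The exception raised by any AllenNLP object when it's misconfigured
--     (e.g. missing properties, invalid properties, unknown properties).
--     """
--
--     def __init__(self, message: str):
--         super().__init__()
--         self.message = message
--
--     def __str__(self):
--         # TODO(brendanr): Is there some reason why we need repr here? It
--         # produces horrible output for simple multi-line error messages.
--         return self.message
--
-- def _get_combination_dim(combination: str, tensor_dims: List[int]) -> int:
--     if combination.isdigit():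
--         index = int(combination) - 1
--         return tensor_dims[index]
--     else:
--         if len(combination) != 3:
--             raise ConfigurationError("Invalid combination: " + combination)
--         first_tensor_dim = _get_combination_dim(combination[0], tensor_dims)
--         second_tensor_dim = _get_combination_dim(combination[2], tensor_dims)
--         operation = combination[1]
--         if first_tensor_dim != second_tensor_dim:
--             raise ConfigurationError(
--                 'Tensor dims must match for operation "{}"'.format(operation))
--         return first_tensor_dim
--
-- def get_combined_dim(combination: str, tensor_dims: List[int]) -> int:
--     """
--     For use with [`combine_tensors`](./util.md#combine_tensors).
--     This function computes the resultant dimension when calling `combine_tensors(combination, tensors)`,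
--     when the tensor dimension is known.  This is necessary for knowing the sizes of weight matrices
--     when building models that use `combine_tensors`.
--
--     # Parameters
--
--     combination : `str`
--         A comma-separated list of combination pieces, like `"1,2,1*2"`, specified identically to
--         `combination` in `combine_tensors`.
--     tensor_dims : `List[int]`
--         A list of tensor dimensions, where each dimension is from the `last axis` of the tensors
--         that will be input to `combine_tensors`.
--     """
--     if len(tensor_dims) > 9:
--         raise ConfigurationError(
--             "Double-digit tensor lists not currently supported")
--     combination = combination.replace("x", "1").replace("y", "2")
--     return sum(
--         _get_combination_dim(piece, tensor_dims)
--         for piece in combination.split(","))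
-- ===== SOURCE B (Python) =====
-- from typing import List
--
--
-- class ConfigurationError(Exception):
--     def __init__(self, message: str):
--         super().__init__()
--         self.message = message
--
--     def __str__(self):
--         return self.message
--
--
-- def get_combined_dim(combination: str, tensor_dims: List[int]) -> int:
--     # Single left-to-right character scan (a 4-state machine), no splitting and
--     # no per-piece substring handling: pos is the offset inside the current
--     # piece, dim the dimension of the piece's leading digit.
--     if len(tensor_dims) > 9:
--         raise ConfigurationError(
--             "Double-digit tensor lists not currently supported")
--     total = 0
--     pos = 0
--     dim = 0
--     for ch in combination + ",":
--         if ch == "x":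
--             ch = "1"
--         elif ch == "y":
--             ch = "2"
--         if ch == ",":
--             if pos != 1 and pos != 3:
--                 raise ConfigurationError("Invalid combination piece")
--             total += dim
--             pos = 0
--         elif pos == 0:
--             if not ch.isdigit():
--                 raise ConfigurationError("Invalid combination: " + ch)
--             dim = tensor_dims[int(ch) - 1]
--             pos = 1
--         elif pos == 1:
--             pos = 2
--         elif pos == 2:
--             if not ch.isdigit():
--                 raise ConfigurationError("Invalid combination: " + ch)
--             if tensor_dims[int(ch) - 1] != dim:
--                 raise ConfigurationError("Tensor dims must match")
--             pos = 3
--         else: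
--             raise ConfigurationError("Invalid combination piece")
--     return total
-- ===== Notes on version B (the rewrite author's own statement) =====
-- stated objective: alternative
-- what changed: Replaces A's split-on-comma plus recursive per-piece helper with a single character-level four-state scan (offset-in-piece state machine) that never materialises the pieces.
-- outside the precondition, e.g. on get_combined_dim('00', [5]): A returns 5, B raises ConfigurationError
import Mathlib
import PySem

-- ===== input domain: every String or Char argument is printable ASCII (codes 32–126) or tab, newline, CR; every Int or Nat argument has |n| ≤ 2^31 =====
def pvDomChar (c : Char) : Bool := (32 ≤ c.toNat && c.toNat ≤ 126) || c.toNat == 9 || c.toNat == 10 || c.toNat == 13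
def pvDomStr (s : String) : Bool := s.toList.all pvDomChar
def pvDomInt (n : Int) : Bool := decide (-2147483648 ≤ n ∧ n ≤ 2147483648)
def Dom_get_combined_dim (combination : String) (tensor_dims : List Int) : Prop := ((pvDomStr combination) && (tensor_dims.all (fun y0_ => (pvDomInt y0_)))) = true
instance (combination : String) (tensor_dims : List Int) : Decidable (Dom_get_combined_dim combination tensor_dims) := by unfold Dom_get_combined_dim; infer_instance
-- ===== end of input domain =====

-- B replaces A's split-on-comma + recursive per-piece evaluation with one character-level
-- four-state scan of the string (objective: alternative, same cost).


-- ===== PORT A =====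
-- _get_combination_dim; raise paths (excluded by Pre_) return 0
def pvAPiece (comb : List Char) (dims : List Int) : Int :=
  if PySem.Chars.strIsdigit comb then
    PySem.List.pyGetD dims ((PySem.Int.ofChars? comb).getD 0 - 1) 0
  else
    match comb with
    | [a, _op, b] =>
        let first := pvAPiece [a] dims
        let second := pvAPiece [b] dims
        if first ≠ second then 0 else first
    | _ => 0

def get_combined_dim (combination : String) (tensor_dims : List Int) : Int :=
  if tensor_dims.length > 9 then 0
  else
    let c := PySem.Chars.replace (PySem.Chars.replace combination.toList ['x'] ['1']) ['y'] ['2']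
    ((PySem.Chars.splitOn c [',']).map (fun p => pvAPiece p tensor_dims)).sum

-- ===== PORT B =====
-- the per-char x→1 / y→2 translation B's loop applies to each character
def pvRepl (c : Char) : Char := if c = 'x' then '1' else if c = 'y' then '2' else c

-- one step of B's four-state scanner; state = none once Python B has raised,
-- otherwise some (total, pos-in-piece, dim of the current piece's leading digit)
def pvScanStep (dims : List Int) (st : Option (Int × Nat × Int)) (ch : Char) : Option (Int × Nat × Int) :=
  match st with
  | none => none
  | some (total, pos, dim) =>
      if ch = ',' then
        if pos = 1 ∨ pos = 3 then some (total + dim, 0, dim) else none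
      else if pos = 0 then
        if PySem.Chars.isdigit ch then
          match PySem.List.pyGet? dims ((PySem.Int.ofChars? [ch]).getD 0 - 1) with
          | some d => some (total, 1, d)
          | none => none
        else none
      else if pos = 1 then some (total, 2, dim)
      else if pos = 2 then
        if PySem.Chars.isdigit ch then
          match PySem.List.pyGet? dims ((PySem.Int.ofChars? [ch]).getD 0 - 1) with
          | some d => if d ≠ dim then none else some (total, 3, dim)
          | none => none
        else none
      else none

def pvStep (dims : List Int) (st : Option (Int × Nat × Int)) (ch : Char) : Option (Int × Nat × Int) :=
  pvScanStep dims st (pvRepl ch)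

def get_combined_dim_alt (combination : String) (tensor_dims : List Int) : Int :=
  if tensor_dims.length > 9 then 0
  else
    match (combination.toList ++ [',']).foldl (pvStep tensor_dims) (some (0, 0, 0)) with
    | some (total, _, _) => total
    | none => 0

-- ===== PRECONDITION & SPEC =====
def pvCharVal (c : Char) : Int := (PySem.Int.ofChars? [c]).getD 0
def pvDimOf (dims : List Int) (c : Char) : Option Int := PySem.List.pyGet? dims (pvCharVal c - 1)

-- a piece both programs accept: a single digit with a valid index, or digit–op–digit with
-- valid indices and equal dims (op a non-digit; all-digit pieces take A's int() branch)
def pvPieceOK (dims : List Int) : List Char → Bool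
  | [a] => PySem.Chars.isdigit a && (pvDimOf dims a).isSome
  | [a, op, b] =>
      PySem.Chars.isdigit a && !PySem.Chars.isdigit op && !(op = ',') &&
      PySem.Chars.isdigit b && (pvDimOf dims a).isSome && (pvDimOf dims a == pvDimOf dims b)
  | _ => false

-- Pre_ excludes (i) the inputs on which Python A raises, and (ii) all-digit pieces of
-- length ≥ 2 (reachable only via leading zeros, e.g. '00'), on which A still returns a
-- value through int() coercion and negative-index wraparound while B's scanner raises.
def Pre_get_combined_dim (combination : String) (tensor_dims : List Int) : Prop :=
  tensor_dims.length ≤ 9 ∧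
  (PySem.Chars.splitOn
      (PySem.Chars.replace (PySem.Chars.replace combination.toList ['x'] ['1']) ['y'] ['2'])
      [',']).all (pvPieceOK tensor_dims) = true

instance (combination : String) (tensor_dims : List Int) : Decidable (Pre_get_combined_dim combination tensor_dims) := by
  unfold Pre_get_combined_dim; infer_instance

def pvWitness_get_combined_dim : String × List Int := ("1,2,1*2", [3, 3])

def Spec_get_combined_dim (combination : String) (tensor_dims : List Int) (out : Int) : Prop := out = get_combined_dim_alt combination tensor_dims
instance (combination : String) (tensor_dims : List Int) (out : Int) : Decidable (Spec_get_combined_dim combination tensor_dims out) := by unfold Spec_get_combined_dim; infer_instance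

-- ===== CLAIM (what is proved, stated in full; the proofs are below) =====
def Claim_equal_get_combined_dim : Prop := ∀ (combination : String) (tensor_dims : List Int), Dom_get_combined_dim combination tensor_dims → Pre_get_combined_dim combination tensor_dims → Spec_get_combined_dim combination tensor_dims (get_combined_dim combination tensor_dims)

-- ===== LEMMAS AND PROOFS =====

-- reference splitter: split a char list on ','
def pvSplit : List Char → List (List Char)
  | [] => [[]]
  | c :: r => if c = ',' then [] :: pvSplit r else (pvSplit r).modifyHead (c :: ·)

theorem pvSplit_ne_nil (l : List Char) : pvSplit l ≠ [] := by
  induction l with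
  | nil => simp [pvSplit]
  | cons c r ih =>
      unfold pvSplit
      split
      · simp
      · cases h : pvSplit r with
        | nil => exact absurd h ih
        | cons p ps => simp

theorem pvSplitOn_go_eq (fuel : Nat) : ∀ (l cur : List Char) (accs : List (List Char)),
    l.length ≤ fuel →
    PySem.Chars.splitOn.go [','] fuel l cur accs = accs.reverse ++ (pvSplit l).modifyHead (cur.reverse ++ ·) := by
  induction fuel with
  | zero =>
      intro l cur accs hl
      have : l = [] := List.eq_nil_of_length_eq_zero (Nat.le_zero.mp hl)
      subst this
      simp [PySem.Chars.splitOn.go, pvSplit]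
  | succ fuel ih =>
      intro l cur accs hl
      cases l with
      | nil => simp [PySem.Chars.splitOn.go, pvSplit]
      | cons c rest =>
          rw [PySem.Chars.splitOn.go]
          have hrest : rest.length ≤ fuel := by simpa using hl
          by_cases hc : c = ','
          · subst hc
            have hpre : List.isPrefixOf [','] (',' :: rest) = true := by simp [List.isPrefixOf]
            simp only [hpre, if_true, List.length, List.drop]
            rw [ih rest [] (cur.reverse :: accs) hrest]
            cases h : pvSplit rest with
            | nil => exact absurd h (pvSplit_ne_nil rest)
            | cons p ps => simp [pvSplit, h]
          · have hpre : List.isPrefixOf [','] (c :: rest) = false := by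
              simp [List.isPrefixOf]
              exact fun h => hc h.symm
            simp only [hpre, Bool.false_eq_true, if_false]
            rw [ih rest (c :: cur) accs hrest]
            cases h : pvSplit rest with
            | nil => exact absurd h (pvSplit_ne_nil rest)
            | cons p ps => simp [pvSplit, hc, h]

theorem pvSplitOn_eq (s : List Char) : PySem.Chars.splitOn s [','] = pvSplit s := by
  unfold PySem.Chars.splitOn
  rw [pvSplitOn_go_eq (s.length + 1) s [] [] (Nat.le_succ _)]
  cases h : pvSplit s with
  | nil => exact absurd h (pvSplit_ne_nil s)
  | cons p ps => simp

theorem pvReplace_go_single (a b : Char) (fuel : Nat) : ∀ (l acc : List Char),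
    l.length ≤ fuel →
    PySem.Chars.replace.go [a] [b] fuel l acc = acc.reverse ++ l.map (fun c => if c = a then b else c) := by
  induction fuel with
  | zero =>
      intro l acc hl
      have : l = [] := List.eq_nil_of_length_eq_zero (Nat.le_zero.mp hl)
      subst this
      simp [PySem.Chars.replace.go]
  | succ fuel ih =>
      intro l acc hl
      cases l with
      | nil => simp [PySem.Chars.replace.go]
      | cons c rest =>
          rw [PySem.Chars.replace.go]
          have hrest : rest.length ≤ fuel := by simpa using hl
          by_cases hc : c = a
          · subst hc
            have hpre : List.isPrefixOf [c] (c :: rest) = true := by simp [List.isPrefixOf]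
            simp only [hpre, if_true, List.length, List.drop]
            rw [ih rest ([b].reverse ++ acc) hrest]
            simp
          · have hpre : List.isPrefixOf [a] (c :: rest) = false := by
              simp [List.isPrefixOf]
              exact fun h => hc h.symm
            simp only [hpre, Bool.false_eq_true, if_false]
            rw [ih rest (c :: acc) hrest]
            simp [hc]

theorem pvReplace_single (s : List Char) (a b : Char) :
    PySem.Chars.replace s [a] [b] = s.map (fun c => if c = a then b else c) := by
  unfold PySem.Chars.replace
  simp only [List.isEmpty_cons, Bool.false_eq_true, if_false]
  rw [pvReplace_go_single a b s.length s [] (le_refl _)]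
  simp

theorem pvReplaced_eq_map (s : List Char) :
    PySem.Chars.replace (PySem.Chars.replace s ['x'] ['1']) ['y'] ['2'] = s.map pvRepl := by
  rw [pvReplace_single, pvReplace_single, List.map_map]
  apply List.map_congr_left
  intro c _
  by_cases hx : c = 'x'
  · subst hx; simp [pvRepl]
  · by_cases hy : c = 'y'
    · subst hy; simp [pvRepl]
    · simp [pvRepl, hx, hy]

def pvPieceVal (dims : List Int) : List Char → Int
  | [a] => (pvDimOf dims a).getD 0
  | [a, _, _] => (pvDimOf dims a).getD 0
  | _ => 0

theorem pvDigit_ne_comma {c : Char} (h : PySem.Chars.isdigit c = true) : c ≠ ',' := by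
  intro hc; subst hc; simp [PySem.Chars.isdigit] at h

theorem pvAPiece_ok (dims : List Int) (p : List Char) (h : pvPieceOK dims p = true) :
    pvAPiece p dims = pvPieceVal dims p := by
  match p with
  | [a] =>
      simp only [pvPieceOK, Bool.and_eq_true] at h
      simp [pvAPiece, PySem.Chars.strIsdigit, h.1, pvPieceVal, PySem.List.pyGetD, pvDimOf, pvCharVal]
  | [a, op, b] =>
      simp only [pvPieceOK, Bool.and_eq_true, Bool.not_eq_true', beq_iff_eq, decide_eq_false_iff_not] at h
      obtain ⟨⟨⟨⟨⟨ha, hop⟩, hopc⟩, hb⟩, hsome⟩, heq⟩ := h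
      have hsd : PySem.Chars.strIsdigit [a, op, b] = false := by
        simp [PySem.Chars.strIsdigit, hop]
      rw [pvAPiece.eq_def]
      simp only [hsd, Bool.false_eq_true, if_false]
      have h1 : pvAPiece [a] dims = (pvDimOf dims a).getD 0 := by
        simp [pvAPiece, PySem.Chars.strIsdigit, ha, PySem.List.pyGetD, pvDimOf, pvCharVal]
      have h2 : pvAPiece [b] dims = (pvDimOf dims b).getD 0 := by
        simp [pvAPiece, PySem.Chars.strIsdigit, hb, PySem.List.pyGetD, pvDimOf, pvCharVal]
      rw [h1, h2, ← heq]
      simp [pvPieceVal]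
  | [] => simp [pvPieceOK] at h
  | [a, b] => simp [pvPieceOK] at h
  | a :: b :: c :: d :: r => simp [pvPieceOK] at h

theorem pvFlatten_pieces (cs : List Char) :
    cs ++ [','] = ((pvSplit cs).map (· ++ [','])).flatten := by
  induction cs with
  | nil => simp [pvSplit]
  | cons c r ih =>
      by_cases hc : c = ','
      · subst hc; simp [pvSplit, ih]
      · cases h : pvSplit r with
        | nil => exact absurd h (pvSplit_ne_nil r)
        | cons p ps =>
            simp only [pvSplit, hc, if_false, h, List.modifyHead_cons, List.map_cons,
              List.flatten_cons, List.cons_append]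
            rw [ih, h]
            simp

theorem pvScan_ok (dims : List Int) : ∀ (ps : List (List Char)),
    (∀ p ∈ ps, pvPieceOK dims p = true) → ∀ (t d : Int),
    ∃ d', List.foldl (pvScanStep dims) (some (t, 0, d)) ((ps.map (· ++ [','])).flatten)
      = some (t + (ps.map (pvPieceVal dims)).sum, 0, d') := by
  intro ps
  induction ps with
  | nil => intro _ t d; exact ⟨d, by simp⟩
  | cons p rest ih =>
      intro hOK t d
      have hp := hOK p (List.mem_cons_self ..)
      have hrest : ∀ q ∈ rest, pvPieceOK dims q = true := fun q hq => hOK q (List.mem_cons_of_mem _ hq)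
      simp only [List.map_cons, List.flatten_cons, List.foldl_append]
      match p, hp with
      | [a], hp =>
          simp only [pvPieceOK, Bool.and_eq_true] at hp
          obtain ⟨ha, hsome⟩ := hp
          obtain ⟨da, hda⟩ := Option.isSome_iff_exists.mp hsome
          have hane : a ≠ ',' := pvDigit_ne_comma ha
          have hda' : PySem.List.pyGet? dims ((PySem.Int.ofChars? [a]).getD 0 - 1) = some da := hda
          have s1 : pvScanStep dims (some (t, 0, d)) a = some (t, 1, da) := by
            simp [pvScanStep, hane, ha, hda']
          have s2 : pvScanStep dims (some (t, 1, da)) ',' = some (t + da, 0, da) := by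
            simp [pvScanStep]
          simp only [List.foldl_cons, List.foldl_nil, s1, s2]
          obtain ⟨d', hd'⟩ := ih hrest (t + da) da
          refine ⟨d', ?_⟩
          rw [hd']
          have hv : pvPieceVal dims [a] = da := by simp [pvPieceVal, hda]
          simp only [List.sum_cons, hv]
          ring_nf
      | [a, op, b], hp =>
          simp only [pvPieceOK, Bool.and_eq_true, Bool.not_eq_true', beq_iff_eq,
            decide_eq_false_iff_not] at hp
          obtain ⟨⟨⟨⟨⟨ha, hop⟩, hopc⟩, hb⟩, hsome⟩, heq⟩ := hp
          obtain ⟨da, hda⟩ := Option.isSome_iff_exists.mp hsome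
          have hane : a ≠ ',' := pvDigit_ne_comma ha
          have hbne : b ≠ ',' := pvDigit_ne_comma hb
          have hda' : PySem.List.pyGet? dims ((PySem.Int.ofChars? [a]).getD 0 - 1) = some da := hda
          have hdb : pvDimOf dims b = some da := by rw [← heq]; exact hda
          have hdb' : PySem.List.pyGet? dims ((PySem.Int.ofChars? [b]).getD 0 - 1) = some da := hdb
          have s1 : pvScanStep dims (some (t, 0, d)) a = some (t, 1, da) := by
            simp [pvScanStep, hane, ha, hda']
          have s2 : pvScanStep dims (some (t, 1, da)) op = some (t, 2, da) := by
            simp [pvScanStep, hopc]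
          have s3 : pvScanStep dims (some (t, 2, da)) b = some (t, 3, da) := by
            simp [pvScanStep, hbne, hb, hdb']
          have s4 : pvScanStep dims (some (t, 3, da)) ',' = some (t + da, 0, da) := by
            simp [pvScanStep]
          simp only [List.foldl_cons, List.foldl_nil, s1, s2, s3, s4]
          obtain ⟨d', hd'⟩ := ih hrest (t + da) da
          refine ⟨d', ?_⟩
          rw [hd']
          have hv : pvPieceVal dims [a, op, b] = da := by simp [pvPieceVal, hda]
          simp only [List.sum_cons, hv]
          ring_nf
      | [], hp => simp [pvPieceOK] at hp
      | [a, b], hp => simp [pvPieceOK] at hp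
      | a :: b :: c :: e :: r, hp => simp [pvPieceOK] at hp

-- ===== VERDICT (by name: the statement is the Claim_ definition above) =====
theorem get_combined_dim_spec : Claim_equal_get_combined_dim := by
  intro combination tensor_dims _hdom hpre
  unfold Spec_get_combined_dim
  obtain ⟨h9, hall⟩ := hpre
  rw [pvReplaced_eq_map, pvSplitOn_eq, List.all_eq_true] at hall
  have h9' : ¬ tensor_dims.length > 9 := by omega
  unfold get_combined_dim get_combined_dim_alt
  simp only [h9', if_false]
  rw [pvReplaced_eq_map, pvSplitOn_eq]
  -- B side: push the per-char translation out of the fold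
  have hfold : (combination.toList ++ [',']).foldl (pvStep tensor_dims) (some (0, 0, 0))
      = (combination.toList.map pvRepl ++ [',']).foldl (pvScanStep tensor_dims) (some (0, 0, 0)) := by
    have : (combination.toList ++ [',']).map pvRepl = combination.toList.map pvRepl ++ [','] := by
      simp [pvRepl]
    rw [← this, List.foldl_map]
    rfl
  rw [hfold, pvFlatten_pieces (combination.toList.map pvRepl)]
  obtain ⟨d', hd'⟩ := pvScan_ok tensor_dims (pvSplit (combination.toList.map pvRepl)) hall 0 0
  rw [hd']
  have : ∀ p ∈ pvSplit (combination.toList.map pvRepl),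
      pvAPiece p tensor_dims = pvPieceVal tensor_dims p := fun p hp => pvAPiece_ok _ _ (hall p hp)
  rw [List.map_congr_left this]
  simp
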